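-- pv_equiv track=rewrite | github.com/pypi-data/pypi-mirror-398 | packages/bioblueprint/bioblueprint-1.1.4-py3-none-any.whl/bioblueprint/tools/update_io.py | phb_resolve_classifications
-- ===== SOURCE A (Python) =====
-- from typing import Literal, Dict, List, Tuple, Union, Any
--
-- def phb_resolve_classifications(
--     var_name: str,
--     description: str,
-- ) -> Literal["docker", "database", "reference", "runtime", "general"]:
--     """
--     Resolve classifications based on variable name and descriptions.
--
--     Args:
--         var_name (str): The variable name.
--         description (str): The variable description.
--     Returns:
--         The string classification category.
--     """
--     return (
--         "docker"
--         if any(_ in var_name for _ in ["docker", "docker_image"])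
--         and "internal component" not in description.lower()
--         else (
--             "database"
--             if any(_ in var_name for _ in ["db", "database"])
--             and "internal component" not in description.lower()
--             else (
--                 "reference"
--                 if any(_ in var_name for _ in ["_ref", "ref_", "reference"])
--                 and "internal component" not in description.lower()
--                 else (
--                     "runtime"
--                     if any(
--                         _ in var_name
--                         for _ in ["cpu", "disk", "disk_size", "_mem", "mem_", "memory"]
--                     )
--                     and "internal component" not in description.lower()
--                     else "general"
--                 )
--             )
--         )
--     )
-- ===== SOURCE B (Python) =====
-- # Keyword -> rule priority.  The superstring keywords of A's groups
-- # ("docker_image", "disk_size") are dropped: they can only occur in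
-- # var_name where their substring keyword ("docker", "disk") occurs.
-- _KEYWORD_PRIORITY = {
--     "docker": 0,
--     "db": 1, "database": 1,
--     "_ref": 2, "ref_": 2, "reference": 2,
--     "cpu": 3, "disk": 3, "_mem": 3, "mem_": 3, "memory": 3,
-- }
-- _LABELS = ("docker", "database", "reference", "runtime", "general")
--
--
-- def phb_resolve_classifications(var_name: str, description: str) -> str:
--     """Single left-to-right positional scan keeping the minimum matched priority."""
--     if "internal component" in description.lower():
--         return "general"
--     best = 4
--     for i in range(len(var_name)):
--         for kw, pri in _KEYWORD_PRIORITY.items():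
--             if pri < best and var_name.startswith(kw, i):
--                 best = pri
--     return _LABELS[best]
-- ===== Notes on version B (the rewrite author's own statement) =====
-- stated objective: alternative
-- what changed: Instead of A's ordered group-membership tests (four any-substring checks, each re-lowering the description), B does one positional scan of var_name, testing at each offset which keywords of a pruned keyword->priority map start there and keeping the minimum priority, then indexes a label table; redundant superstring keywords (docker_image, disk_size) are removed.
import Mathlib
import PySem

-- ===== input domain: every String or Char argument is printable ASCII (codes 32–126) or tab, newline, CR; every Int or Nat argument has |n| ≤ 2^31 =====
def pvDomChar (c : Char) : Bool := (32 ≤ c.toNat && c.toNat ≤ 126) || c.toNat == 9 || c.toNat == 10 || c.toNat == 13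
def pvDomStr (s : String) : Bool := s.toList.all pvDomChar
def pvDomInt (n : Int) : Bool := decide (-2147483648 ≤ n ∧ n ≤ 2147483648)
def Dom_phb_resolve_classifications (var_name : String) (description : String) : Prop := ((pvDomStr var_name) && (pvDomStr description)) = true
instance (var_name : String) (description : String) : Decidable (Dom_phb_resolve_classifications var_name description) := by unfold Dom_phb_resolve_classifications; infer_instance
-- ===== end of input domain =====

-- ===== PORT A =====
-- header: B replaces A's ordered group-membership tests with one positional scan of var_name
-- keeping the minimum matched rule priority over a pruned keyword→priority table (alternative).
def phb_resolve_classifications (var_name : String) (description : String) : String :=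
  if (["docker", "docker_image"].any (fun t => PySem.Str.isIn t var_name))
      && !(PySem.Str.isIn "internal component" (PySem.Str.lower description)) then "docker"
  else if (["db", "database"].any (fun t => PySem.Str.isIn t var_name))
      && !(PySem.Str.isIn "internal component" (PySem.Str.lower description)) then "database"
  else if (["_ref", "ref_", "reference"].any (fun t => PySem.Str.isIn t var_name))
      && !(PySem.Str.isIn "internal component" (PySem.Str.lower description)) then "reference"
  else if (["cpu", "disk", "disk_size", "_mem", "mem_", "memory"].any (fun t => PySem.Str.isIn t var_name))
      && !(PySem.Str.isIn "internal component" (PySem.Str.lower description)) then "runtime"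
  else "general"

-- ===== PORT B =====
def phbKW : List (String × Nat) :=
  [("docker", 0), ("db", 1), ("database", 1),
   ("_ref", 2), ("ref_", 2), ("reference", 2),
   ("cpu", 3), ("disk", 3), ("_mem", 3), ("mem_", 3), ("memory", 3)]

def phbLabels : List String := ["docker", "database", "reference", "runtime", "general"]

-- the inner-loop body: 'if pri < best and var_name.startswith(kw, i): best = pri'
-- Python's var_name.startswith(kw, i) with 0 ≤ i is exactly Chars.startswith on toList.drop i
-- (PySem has no start-offset startswith, so this one call is ported by hand).
def phbStep (s : List Char) (i : Nat) (b : Nat) (kv : String × Nat) : Nat :=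
  if kv.2 < b && PySem.Chars.startswith (s.drop i) kv.1.toList then kv.2 else b

def phb_resolve_classifications_alt (var_name : String) (description : String) : String :=
  if PySem.Str.isIn "internal component" (PySem.Str.lower description) then "general"
  else
    let s := var_name.toList
    let best := (List.range s.length).foldl (fun b i => phbKW.foldl (phbStep s i) b) 4
    phbLabels.getD best "general"

-- ===== PRECONDITION & SPEC =====
def Spec_phb_resolve_classifications (var_name : String) (description : String) (out : String) : Prop := out = phb_resolve_classifications_alt var_name description
instance (var_name : String) (description : String) (out : String) : Decidable (Spec_phb_resolve_classifications var_name description out) := by unfold Spec_phb_resolve_classifications; infer_instance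

-- ===== CLAIM (what is proved, stated in full; the proofs are below) =====
def Claim_equal_phb_resolve_classifications : Prop := ∀ (var_name : String) (description : String), Dom_phb_resolve_classifications var_name description → Spec_phb_resolve_classifications var_name description (phb_resolve_classifications var_name description)

-- ===== LEMMAS AND PROOFS =====

set_option maxHeartbeats 1000000

theorem phbStep_le (s : List Char) (i b : Nat) (kv : String × Nat) : phbStep s i b kv ≤ b := by
  unfold phbStep; split_ifs with h
  · simp only [Bool.and_eq_true, decide_eq_true_eq] at h; omega
  · exact le_refl b

theorem inner_le (s : List Char) (i : Nat) (r : List (String × Nat)) (b : Nat) :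
    r.foldl (phbStep s i) b ≤ b := by
  induction r generalizing b with
  | nil => simp
  | cons kv t ih =>
    simp only [List.foldl_cons]
    exact le_trans (ih (phbStep s i b kv)) (phbStep_le s i b kv)

theorem inner_attain (s : List Char) (i : Nat) (r : List (String × Nat)) (b : Nat) :
    r.foldl (phbStep s i) b = b ∨
      ∃ kv ∈ r, kv.2 = r.foldl (phbStep s i) b ∧
        PySem.Chars.startswith (s.drop i) kv.1.toList = true := by
  induction r generalizing b with
  | nil => left; rfl
  | cons kv t ih =>
    simp only [List.foldl_cons]
    by_cases h : (kv.2 < b && PySem.Chars.startswith (s.drop i) kv.1.toList) = true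
    · have hs : PySem.Chars.startswith (s.drop i) kv.1.toList = true := by
        simp only [Bool.and_eq_true] at h; exact h.2
      have hstep : phbStep s i b kv = kv.2 := by unfold phbStep; simp [h]
      rw [hstep]
      rcases ih kv.2 with he | ⟨kv', hm, he, hs'⟩
      · right; exact ⟨kv, List.mem_cons_self, he.symm, hs⟩
      · right; exact ⟨kv', List.mem_cons_of_mem _ hm, he, hs'⟩
    · have hstep : phbStep s i b kv = b := by unfold phbStep; simp [h]
      rw [hstep]
      rcases ih b with he | ⟨kv', hm, he, hs'⟩
      · left; exact he
      · right; exact ⟨kv', List.mem_cons_of_mem _ hm, he, hs'⟩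

theorem inner_match_le (s : List Char) (i : Nat)
    (kv : String × Nat)
    (hs : PySem.Chars.startswith (s.drop i) kv.1.toList = true) :
    ∀ (r : List (String × Nat)), kv ∈ r → ∀ (b : Nat), r.foldl (phbStep s i) b ≤ kv.2 := by
  intro r
  induction r with
  | nil => intro hm; cases hm
  | cons hd t ih =>
    intro hm b
    simp only [List.foldl_cons]
    rcases List.mem_cons.mp hm with rfl | hm'
    · refine le_trans (inner_le s i t _) ?_
      unfold phbStep; split_ifs with h
      · exact le_refl _
      · simp only [hs, Bool.and_true, decide_eq_true_eq] at h; omega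
    · exact ih hm' _

theorem scan_le (s : List Char) (l : List Nat) (b : Nat) :
    l.foldl (fun b i => phbKW.foldl (phbStep s i) b) b ≤ b := by
  induction l generalizing b with
  | nil => simp
  | cons i t ih =>
    simp only [List.foldl_cons]
    exact le_trans (ih _) (inner_le s i phbKW b)

theorem scan_attain (s : List Char) (l : List Nat) (b : Nat) :
    l.foldl (fun b i => phbKW.foldl (phbStep s i) b) b = b ∨
      ∃ i ∈ l, ∃ kv ∈ phbKW,
        kv.2 = l.foldl (fun b i => phbKW.foldl (phbStep s i) b) b ∧
        PySem.Chars.startswith (s.drop i) kv.1.toList = true := by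
  induction l generalizing b with
  | nil => left; rfl
  | cons i t ih =>
    simp only [List.foldl_cons]
    rcases ih (phbKW.foldl (phbStep s i) b) with he | ⟨j, hj, kv, hkv, he, hsw⟩
    · rcases inner_attain s i phbKW b with he' | ⟨kv, hkv, he', hsw⟩
      · left; rw [he, he']
      · right; exact ⟨i, List.mem_cons_self, kv, hkv, he'.trans he.symm, hsw⟩
    · right; exact ⟨j, List.mem_cons_of_mem _ hj, kv, hkv, he, hsw⟩

theorem scan_match_le (s : List Char) (i : Nat)
    (kv : String × Nat) (hkv : kv ∈ phbKW)
    (hs : PySem.Chars.startswith (s.drop i) kv.1.toList = true) :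
    ∀ (l : List Nat), i ∈ l → ∀ (b : Nat),
      l.foldl (fun b i => phbKW.foldl (phbStep s i) b) b ≤ kv.2 := by
  intro l
  induction l with
  | nil => intro hi; cases hi
  | cons j t ih =>
    intro hi b
    simp only [List.foldl_cons]
    rcases List.mem_cons.mp hi with rfl | hi'
    · exact le_trans (scan_le s t _) (inner_match_le s i kv hs phbKW hkv b)
    · exact ih hi' _

-- infix ↔ some position matches, over the range of positions
theorem infix_exists_pos {t : String} {s : List Char} (h : t.toList <:+: s)
    (hne : t.toList ≠ []) :
    ∃ i ∈ List.range s.length, PySem.Chars.startswith (s.drop i) t.toList = true := by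
  have hin : PySem.Chars.isIn t.toList s = true := (PySem.Chars.isIn_iff_infix _ _).mpr h
  obtain ⟨j, hj⟩ := (PySem.Chars.exists_prefix_drop_iff_isIn (sub := t.toList) (s := s)).mpr hin
  have hjlt : j < s.length := by
    by_contra hge
    have : s.drop j = [] := List.drop_eq_nil_of_le (by omega)
    rw [this] at hj
    exact hne (List.prefix_nil.mp hj)
  exact ⟨j, List.mem_range.mpr hjlt, (PySem.Chars.startswith_iff _ _).mpr hj⟩

theorem pos_infix {t : String} {s : List Char} {i : Nat}
    (h : PySem.Chars.startswith (s.drop i) t.toList = true) : t.toList <:+: s := by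
  have hp : t.toList <+: s.drop i := (PySem.Chars.startswith_iff _ _).mp h
  exact (PySem.Chars.isIn_iff_infix _ _).mp
    ((PySem.Chars.exists_prefix_drop_iff_isIn (sub := t.toList) (s := s)).mp ⟨i, hp⟩)

-- the scan result as a function of which keywords occur in s
theorem scan_eq_cases (s : List Char) :
    (List.range s.length).foldl (fun b i => phbKW.foldl (phbStep s i) b) 4 =
      (if "docker".toList <:+: s then 0
       else if "db".toList <:+: s ∨ "database".toList <:+: s then 1
       else if "_ref".toList <:+: s ∨ "ref_".toList <:+: s ∨ "reference".toList <:+: s then 2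
       else if "cpu".toList <:+: s ∨ "disk".toList <:+: s ∨ "_mem".toList <:+: s ∨
               "mem_".toList <:+: s ∨ "memory".toList <:+: s then 3
       else 4) := by
  have hR4 : (List.range s.length).foldl (fun b i => phbKW.foldl (phbStep s i) b) 4 ≤ 4 :=
    scan_le s _ 4
  have hmem : (List.range s.length).foldl (fun b i => phbKW.foldl (phbStep s i) b) 4 = 4 ∨
      ∃ kv ∈ phbKW,
        kv.2 = (List.range s.length).foldl (fun b i => phbKW.foldl (phbStep s i) b) 4 ∧
        kv.1.toList <:+: s := by
    rcases scan_attain s (List.range s.length) 4 with he | ⟨i, _, kv, hkv, he, hsw⟩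
    · left; exact he
    · right; exact ⟨kv, hkv, he, pos_infix hsw⟩
  have hle : ∀ kv ∈ phbKW, kv.1.toList <:+: s →
      (List.range s.length).foldl (fun b i => phbKW.foldl (phbStep s i) b) 4 ≤ kv.2 := by
    intro kv hkv hinf
    have hne : kv.1.toList ≠ [] := by fin_cases hkv <;> decide
    obtain ⟨i, hi, hsw⟩ := infix_exists_pos hinf hne
    exact scan_match_le s i kv hkv hsw _ hi 4
  revert hR4 hmem hle
  generalize (List.range s.length).foldl (fun b i => phbKW.foldl (phbStep s i) b) 4 = R
  intro hR4 hmem hle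
  split_ifs with h0 h1 h2 h3
  · exact Nat.le_antisymm (hle ("docker", 0) (by simp [phbKW]) h0) (Nat.zero_le _)
  · have hub : R ≤ 1 := by
      rcases h1 with h | h
      · exact hle ("db", 1) (by simp [phbKW]) h
      · exact hle ("database", 1) (by simp [phbKW]) h
    rcases hmem with he | ⟨kv, hkv, he, hinf⟩
    · omega
    · fin_cases hkv <;> simp only at he <;>
        first
          | omega
          | exact absurd hinf h0
  · have hub : R ≤ 2 := by
      rcases h2 with h | h | h
      · exact hle ("_ref", 2) (by simp [phbKW]) h
      · exact hle ("ref_", 2) (by simp [phbKW]) h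
      · exact hle ("reference", 2) (by simp [phbKW]) h
    rcases hmem with he | ⟨kv, hkv, he, hinf⟩
    · omega
    · fin_cases hkv <;> simp only at he <;>
        first
          | omega
          | exact absurd hinf h0
          | exact absurd (Or.inl hinf) h1
          | exact absurd (Or.inr hinf) h1
  · have hub : R ≤ 3 := by
      rcases h3 with h | h | h | h | h
      · exact hle ("cpu", 3) (by simp [phbKW]) h
      · exact hle ("disk", 3) (by simp [phbKW]) h
      · exact hle ("_mem", 3) (by simp [phbKW]) h
      · exact hle ("mem_", 3) (by simp [phbKW]) h
      · exact hle ("memory", 3) (by simp [phbKW]) h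
    rcases hmem with he | ⟨kv, hkv, he, hinf⟩
    · omega
    · fin_cases hkv <;> simp only at he <;>
        first
          | omega
          | exact absurd hinf h0
          | exact absurd (Or.inl hinf) h1
          | exact absurd (Or.inr hinf) h1
          | exact absurd (Or.inl hinf) h2
          | exact absurd (Or.inr (Or.inl hinf)) h2
          | exact absurd (Or.inr (Or.inr hinf)) h2
  · rcases hmem with he | ⟨kv, hkv, he, hinf⟩
    · exact he
    · exfalso
      fin_cases hkv <;>
        first
          | exact absurd hinf h0
          | exact absurd (Or.inl hinf) h1
          | exact absurd (Or.inr hinf) h1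
          | exact absurd (Or.inl hinf) h2
          | exact absurd (Or.inr (Or.inl hinf)) h2
          | exact absurd (Or.inr (Or.inr hinf)) h2
          | exact absurd (Or.inl hinf) h3
          | exact absurd (Or.inr (Or.inl hinf)) h3
          | exact absurd (Or.inr (Or.inr (Or.inl hinf))) h3
          | exact absurd (Or.inr (Or.inr (Or.inr (Or.inl hinf)))) h3
          | exact absurd (Or.inr (Or.inr (Or.inr (Or.inr hinf)))) h3

-- bridge: an A-side group condition ↔ the corresponding infix disjunction
theorem condA1_iff (vn : String) :
    (["docker", "docker_image"].any (fun t => PySem.Str.isIn t vn)) = true ↔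
      "docker".toList <:+: vn.toList := by
  simp only [List.any_cons, List.any_nil, Bool.or_eq_true, Bool.or_false,
    PySem.Str.isIn_eq, PySem.Chars.isIn_iff_infix]
  constructor
  · rintro (h | h)
    · exact h
    · exact List.IsInfix.trans (by decide) h
  · intro h; left; exact h

theorem condA2_iff (vn : String) :
    (["db", "database"].any (fun t => PySem.Str.isIn t vn)) = true ↔
      ("db".toList <:+: vn.toList ∨ "database".toList <:+: vn.toList) := by
  simp [PySem.Chars.isIn_iff_infix]

theorem condA3_iff (vn : String) :
    (["_ref", "ref_", "reference"].any (fun t => PySem.Str.isIn t vn)) = true ↔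
      ("_ref".toList <:+: vn.toList ∨ "ref_".toList <:+: vn.toList ∨
        "reference".toList <:+: vn.toList) := by
  simp [PySem.Chars.isIn_iff_infix]

theorem condA4_iff (vn : String) :
    (["cpu", "disk", "disk_size", "_mem", "mem_", "memory"].any
        (fun t => PySem.Str.isIn t vn)) = true ↔
      ("cpu".toList <:+: vn.toList ∨ "disk".toList <:+: vn.toList ∨
        "_mem".toList <:+: vn.toList ∨ "mem_".toList <:+: vn.toList ∨
        "memory".toList <:+: vn.toList) := by
  simp only [List.any_cons, List.any_nil, Bool.or_eq_true, Bool.or_false,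
    PySem.Str.isIn_eq, PySem.Chars.isIn_iff_infix]
  constructor
  · rintro (h | h | h | h | h | h)
    · exact Or.inl h
    · exact Or.inr (Or.inl h)
    · exact Or.inr (Or.inl (List.IsInfix.trans (by decide) h))
    · exact Or.inr (Or.inr (Or.inl h))
    · exact Or.inr (Or.inr (Or.inr (Or.inl h)))
    · exact Or.inr (Or.inr (Or.inr (Or.inr h)))
  · rintro (h | h | h | h | h)
    · exact Or.inl h
    · exact Or.inr (Or.inl h)
    · exact Or.inr (Or.inr (Or.inr (Or.inl h)))
    · exact Or.inr (Or.inr (Or.inr (Or.inr (Or.inl h))))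
    · exact Or.inr (Or.inr (Or.inr (Or.inr (Or.inr h))))

-- ===== VERDICT (by name: the statement is the Claim_ definition above) =====
theorem phb_resolve_classifications_spec : Claim_equal_phb_resolve_classifications := by
  intro vn de _
  unfold Spec_phb_resolve_classifications phb_resolve_classifications phb_resolve_classifications_alt
  cases hg : PySem.Str.isIn "internal component" (PySem.Str.lower de) with
  | true => simp
  | false =>
    simp only [Bool.not_false, Bool.and_true]
    rw [scan_eq_cases vn.toList]
    by_cases h0 : "docker".toList <:+: vn.toList
    · rw [if_pos h0, if_pos ((condA1_iff vn).mpr h0)]; rfl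
    · rw [if_neg h0, if_neg (fun hc => h0 ((condA1_iff vn).mp hc))]
      by_cases h1 : "db".toList <:+: vn.toList ∨ "database".toList <:+: vn.toList
      · rw [if_pos h1, if_pos ((condA2_iff vn).mpr h1)]; rfl
      · rw [if_neg h1, if_neg (by rw [condA2_iff vn]; exact h1)]
        by_cases h2 : "_ref".toList <:+: vn.toList ∨ "ref_".toList <:+: vn.toList ∨
            "reference".toList <:+: vn.toList
        · rw [if_pos h2, if_pos ((condA3_iff vn).mpr h2)]; rfl
        · rw [if_neg h2, if_neg (fun hc => h2 ((condA3_iff vn).mp hc))]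
          by_cases h3 : "cpu".toList <:+: vn.toList ∨ "disk".toList <:+: vn.toList ∨
              "_mem".toList <:+: vn.toList ∨ "mem_".toList <:+: vn.toList ∨
              "memory".toList <:+: vn.toList
          · rw [if_pos h3, if_pos ((condA4_iff vn).mpr h3)]; rfl
          · rw [if_neg h3, if_neg (fun hc => h3 ((condA4_iff vn).mp hc))]; rfl
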